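-- pv_equiv track=rewrite | github.com/mtotho/spindrel | app/agent/context_profiles.py | trim_messages_to_recent_turns
-- ===== SOURCE A (Python) =====
-- def trim_messages_to_recent_turns(messages: list[dict], max_turns: int | None) -> list[dict]:
--     """Trim to the last N user-started turns while preserving any system prefix."""
--     if max_turns is None or max_turns < 0:
--         return list(messages)
--
--     sys_prefix: list[dict] = []
--     body: list[dict] = []
--     in_body = False
--     for msg in messages:
--         if not in_body and msg.get("role") == "system":
--             sys_prefix.append(msg)
--         else:
--             in_body = True
--             body.append(msg)
--
--     if max_turns == 0 or not body:
--         return sys_prefix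
--
--     turn_starts = [idx for idx, msg in enumerate(body) if msg.get("role") == "user"]
--     if not turn_starts:
--         return sys_prefix + body
--
--     keep_from = turn_starts[-max_turns] if max_turns <= len(turn_starts) else 0
--     return sys_prefix + body[keep_from:]
-- ===== SOURCE B (Python) =====
-- def trim_messages_to_recent_turns(messages: list[dict], max_turns: int | None) -> list[dict]:
--     """Trim to the last N user-started turns while preserving any system prefix."""
--     if max_turns is None or max_turns < 0:
--         return list(messages)
--
--     i = 0
--     while i < len(messages) and messages[i].get("role") == "system":
--         i += 1
--     sys_prefix = messages[:i]
--     body = messages[i:]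
--
--     if max_turns == 0 or not body:
--         return sys_prefix
--
--     keep_from = 0
--     remaining = max_turns
--     for j in range(len(body) - 1, -1, -1):
--         if body[j].get("role") == "user":
--             if remaining == 1:
--                 keep_from = j
--                 break
--             remaining -= 1
--     return sys_prefix + body[keep_from:]
-- ===== Notes on version B (the rewrite author's own statement) =====
-- stated objective: simpler
-- what changed: Replaces A's accumulator fold that builds two lists plus the enumerate/filter turn-start index list with negative indexing by a takeWhile-length prefix split and a single reverse scan that counts user messages down to the cut point.
import Mathlib
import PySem

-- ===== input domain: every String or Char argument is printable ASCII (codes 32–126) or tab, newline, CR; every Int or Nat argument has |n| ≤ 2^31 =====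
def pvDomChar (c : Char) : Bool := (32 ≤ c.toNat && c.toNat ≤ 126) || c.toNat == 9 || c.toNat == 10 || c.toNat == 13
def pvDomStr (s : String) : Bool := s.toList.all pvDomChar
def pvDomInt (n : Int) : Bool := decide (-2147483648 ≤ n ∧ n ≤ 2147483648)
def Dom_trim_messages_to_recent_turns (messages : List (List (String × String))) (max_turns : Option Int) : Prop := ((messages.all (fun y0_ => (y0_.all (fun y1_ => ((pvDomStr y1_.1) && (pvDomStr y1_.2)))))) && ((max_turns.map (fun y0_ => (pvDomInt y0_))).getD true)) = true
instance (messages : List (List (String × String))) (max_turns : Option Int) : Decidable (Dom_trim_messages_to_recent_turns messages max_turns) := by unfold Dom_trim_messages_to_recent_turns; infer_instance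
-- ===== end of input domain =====

-- B replaces A's forward enumerate+filter index list and negative indexing by a
-- prefix split plus a single reverse scan that counts user messages (objective: simpler; same O(n)).

-- ===== PORT A =====
-- msg.get("role"): first-match association-list lookup (dicts have unique keys)
def pvRole (m : List (String × String)) : Option String :=
  (m.find? (fun kv => kv.1 == "role")).map (·.2)

def pvSplitStep (acc : List (List (String × String)) × List (List (String × String)) × Bool)
    (msg : List (String × String)) :
    List (List (String × String)) × List (List (String × String)) × Bool :=
  if !acc.2.2 && (pvRole msg == some "system") then (acc.1 ++ [msg], acc.2.1, acc.2.2)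
  else (acc.1, acc.2.1 ++ [msg], true)

def trim_messages_to_recent_turns (messages : List (List (String × String))) (max_turns : Option Int) : List (List (String × String)) :=
  match max_turns with
  | none => messages
  | some mt =>
    if mt < 0 then messages else
    let st := messages.foldl pvSplitStep ([], [], false)
    let sys_prefix := st.1
    let body := st.2.1
    if mt = 0 ∨ body = [] then sys_prefix else
    let turn_starts := ((PySem.List.enumerate body).filter (fun p => pvRole p.2 == some "user")).map (·.1)
    if turn_starts = [] then sys_prefix ++ body else
    let keep_from : Int := if mt ≤ (turn_starts.length : Int) then PySem.List.pyGetD turn_starts (-mt) 0 else 0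
    sys_prefix ++ PySem.List.slice body (some keep_from) none

-- ===== PORT B =====
-- the reverse for-loop with counter and break
def pvFindKeep : List (List (String × String)) → Int → Nat → Nat
  | [], _, _ => 0
  | m :: rest, cnt, j =>
    if pvRole m == some "user" then
      if cnt = 1 then j else pvFindKeep rest (cnt - 1) (j - 1)
    else pvFindKeep rest cnt (j - 1)

def trim_messages_to_recent_turns_alt (messages : List (List (String × String))) (max_turns : Option Int) : List (List (String × String)) :=
  match max_turns with
  | none => messages
  | some mt =>
    if mt < 0 then messages else
    let i := (messages.takeWhile (fun m => pvRole m == some "system")).length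
    let sys_prefix := messages.take i
    let body := messages.drop i
    if mt = 0 ∨ body = [] then sys_prefix else
    sys_prefix ++ body.drop (pvFindKeep body.reverse mt (body.length - 1))

-- ===== PRECONDITION & SPEC =====
def Spec_trim_messages_to_recent_turns (messages : List (List (String × String))) (max_turns : Option Int) (out : List (List (String × String))) : Prop := out = trim_messages_to_recent_turns_alt messages max_turns
instance (messages : List (List (String × String))) (max_turns : Option Int) (out : List (List (String × String))) : Decidable (Spec_trim_messages_to_recent_turns messages max_turns out) := by unfold Spec_trim_messages_to_recent_turns; infer_instance

-- ===== CLAIM (what is proved, stated in full; the proofs are below) =====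
def Claim_equal_trim_messages_to_recent_turns : Prop := ∀ (messages : List (List (String × String))) (max_turns : Option Int), Dom_trim_messages_to_recent_turns messages max_turns → Spec_trim_messages_to_recent_turns messages max_turns (trim_messages_to_recent_turns messages max_turns)

-- ===== LEMMAS AND PROOFS =====

-- A's fold, once in_body, appends everything to body
theorem foldl_split_inbody (ms : List (List (String × String)))
    (sp bd : List (List (String × String))) :
    ms.foldl pvSplitStep (sp, bd, true) = (sp, bd ++ ms, true) := by
  induction ms generalizing bd with
  | nil => simp
  | cons m rest ih => simp [pvSplitStep, ih]

-- A's fold computes the takeWhile/dropWhile split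
theorem foldl_split (ms : List (List (String × String))) (sp : List (List (String × String))) :
    ms.foldl pvSplitStep (sp, [], false) =
      (sp ++ ms.takeWhile (fun m => pvRole m == some "system"),
       ms.dropWhile (fun m => pvRole m == some "system"),
       !(ms.dropWhile (fun m => pvRole m == some "system")).isEmpty) := by
  induction ms generalizing sp with
  | nil => simp
  | cons m rest ih =>
    by_cases h : pvRole m == some "system"
    · simp [pvSplitStep, h, ih]
    · simp [pvSplitStep, h, foldl_split_inbody]

-- B's take/drop of the takeWhile length are takeWhile/dropWhile
theorem take_length_takeWhile' (p : List (String × String) → Bool)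
    (l : List (List (String × String))) : l.take (l.takeWhile p).length = l.takeWhile p := by
  induction l with
  | nil => simp
  | cons a t ih => by_cases h : p a <;> simp [h, ih]

theorem drop_length_takeWhile' (p : List (String × String) → Bool)
    (l : List (List (String × String))) : l.drop (l.takeWhile p).length = l.dropWhile p := by
  induction l with
  | nil => simp
  | cons a t ih => by_cases h : p a <;> simp [h, ih]

-- shorthand for A's turn_starts list
def pvTS (body : List (List (String × String))) : List Int :=
  ((PySem.List.enumerate body).filter (fun p => pvRole p.2 == some "user")).map (·.1)

theorem pvTS_append (bs : List (List (String × String))) (b : List (String × String)) :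
    pvTS (bs ++ [b]) = pvTS bs ++ (if pvRole b == some "user" then [(bs.length : Int)] else []) := by
  unfold pvTS
  rw [PySem.List.enumerate_append]
  by_cases h : pvRole b == some "user" <;>
    simp [PySem.List.enumerate, h]

theorem pvFindKeep_le (l : List (List (String × String))) (cnt : Int) (j : Nat) :
    pvFindKeep l cnt j ≤ j := by
  induction l generalizing cnt j with
  | nil => simp [pvFindKeep]
  | cons m rest ih =>
    simp only [pvFindKeep]
    split
    · split
      · exact Nat.le_refl _
      · exact Nat.le_trans (ih _ _) (Nat.pred_le _)
    · exact Nat.le_trans (ih _ _) (Nat.pred_le _)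

theorem pvTS_bound (l : List (List (String × String))) :
    ∀ x ∈ pvTS l, 0 ≤ x ∧ x < (l.length : Int) := by
  intro x hx
  unfold pvTS at hx
  simp only [List.mem_map, List.mem_filter] at hx
  obtain ⟨p, ⟨hp, -⟩, rfl⟩ := hx
  rw [PySem.List.mem_enumerate_iff] at hp
  obtain ⟨k, hk, rfl⟩ := hp
  omega

-- negative index into an appended singleton steps back one
theorem pyGetD_append_neg (ts : List Int) (x : Int) (mt : Int)
    (h2 : 2 ≤ mt) (hle : mt ≤ (ts.length : Int) + 1) :
    PySem.List.pyGetD (ts ++ [x]) (-mt) 0 = PySem.List.pyGetD ts (-(mt - 1)) 0 := by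
  obtain ⟨k, rfl⟩ : ∃ k : Nat, (k : Int) = mt := ⟨mt.toNat, by omega⟩
  have hk2 : 2 ≤ k := by exact_mod_cast h2
  have hkle : k ≤ ts.length + 1 := by exact_mod_cast hle
  rw [PySem.List.pyGetD_neg_natCast _ _ _ (by omega) (by simp; omega)]
  rw [show (-((k : Int) - 1)) = -(((k - 1 : Nat) : Int)) by push_cast [Nat.cast_sub (by omega : 1 ≤ k)]; ring]
  rw [PySem.List.pyGetD_neg_natCast _ _ _ (by omega) (by omega)]
  apply Option.some.inj
  rw [← List.getElem?_eq_getElem, ← List.getElem?_eq_getElem,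
    List.getElem?_append_left (by simp; omega),
    show (ts ++ [x]).length - k = ts.length - (k - 1) by simp; omega]

-- a in-range negative pyGetD is a member
theorem pyGetD_neg_mem (ts : List Int) (mt : Int) (h1 : 1 ≤ mt) (hle : mt ≤ (ts.length : Int)) :
    PySem.List.pyGetD ts (-mt) 0 ∈ ts := by
  obtain ⟨k, rfl⟩ : ∃ k : Nat, (k : Int) = mt := ⟨mt.toNat, by omega⟩
  rw [PySem.List.pyGetD_neg_natCast _ _ _ (by exact_mod_cast h1) (by exact_mod_cast hle)]
  exact List.getElem_mem _

-- main bridge lemma: the reverse scan computes A's cut point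
theorem main_bridge (body : List (List (String × String))) : ∀ (mt : Int), 1 ≤ mt →
    body.drop (pvFindKeep body.reverse mt (body.length - 1)) =
      PySem.List.slice body
        (some (if mt ≤ ((pvTS body).length : Int) then PySem.List.pyGetD (pvTS body) (-mt) 0 else 0))
        none := by
  induction body using List.reverseRecOn with
  | nil =>
    intro mt hmt
    rw [if_neg (by simp [pvTS, PySem.List.enumerate]; omega)]
    simp [pvFindKeep, PySem.List.slice]
  | append_singleton bs b ih =>
    intro mt hmt
    have hrev : (bs ++ [b]).reverse = b :: bs.reverse := by simp
    have hlen : (bs ++ [b]).length - 1 = bs.length := by simp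
    rw [hrev, hlen, pvTS_append]
    by_cases hu : pvRole b == some "user"
    · rw [if_pos hu]
      simp only [pvFindKeep, hu, if_true]
      by_cases h1 : mt = 1
      · subst h1
        rw [if_pos rfl, if_pos (by simp),
          PySem.List.pyGetD_neg_one_append_singleton,
          PySem.List.slice_from_natCast]
      · rw [if_neg h1]
        have hkfle : pvFindKeep bs.reverse (mt - 1) (bs.length - 1) ≤ bs.length :=
          Nat.le_trans (pvFindKeep_le _ _ _) (Nat.pred_le _)
        rw [List.drop_append_of_le_length hkfle]
        have ihh := ih (mt - 1) (by omega)
        by_cases hc : mt - 1 ≤ ((pvTS bs).length : Int)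
        · rw [if_pos hc] at ihh
          have hv := pvTS_bound bs _ (pyGetD_neg_mem (pvTS bs) (mt - 1) (by omega) hc)
          rw [if_pos (by simp; omega), pyGetD_append_neg _ _ _ (by omega) (by omega)]
          rw [PySem.List.slice_from _ hv.1] at ihh ⊢
          rw [List.drop_append_of_le_length (by omega), ihh]
        · rw [if_neg hc] at ihh
          rw [if_neg (by simp; omega)]
          rw [PySem.List.slice_from _ (by omega)] at ihh ⊢
          simp only [Int.toNat_zero, List.drop_zero] at ihh ⊢
          rw [ihh]
    · rw [if_neg hu]
      have hu' : (pvRole b == some "user") = false := by simpa using hu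
      simp only [pvFindKeep, hu', Bool.false_eq_true, if_false, List.append_nil]
      have hkfle : pvFindKeep bs.reverse mt (bs.length - 1) ≤ bs.length :=
        Nat.le_trans (pvFindKeep_le _ _ _) (Nat.pred_le _)
      rw [List.drop_append_of_le_length hkfle]
      have ihh := ih mt hmt
      by_cases hc : mt ≤ ((pvTS bs).length : Int)
      · rw [if_pos hc] at ihh ⊢
        have hv := pvTS_bound bs _ (pyGetD_neg_mem (pvTS bs) mt hmt hc)
        rw [PySem.List.slice_from _ hv.1] at ihh ⊢
        rw [List.drop_append_of_le_length (by omega), ihh]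
      · rw [if_neg hc] at ihh
        rw [if_neg hc]
        rw [PySem.List.slice_from _ (by omega)] at ihh ⊢
        simp only [Int.toNat_zero, List.drop_zero] at ihh ⊢
        rw [ihh]

-- ===== VERDICT (by name: the statement is the Claim_ definition above) =====
theorem trim_messages_to_recent_turns_spec : Claim_equal_trim_messages_to_recent_turns := by
  intro messages max_turns _
  unfold Spec_trim_messages_to_recent_turns
  cases max_turns with
  | none => rfl
  | some mt =>
    simp only [trim_messages_to_recent_turns, trim_messages_to_recent_turns_alt]
    by_cases h0 : mt < 0
    · simp [h0]
    · rw [if_neg h0, if_neg h0, foldl_split, take_length_takeWhile', drop_length_takeWhile']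
      simp only [List.nil_append]
      set tw := messages.takeWhile (fun m => pvRole m == some "system") with htw
      set dw := messages.dropWhile (fun m => pvRole m == some "system") with hdw
      by_cases hg : mt = 0 ∨ dw = []
      · simp [hg]
      · rw [if_neg hg, if_neg hg]
        have hmt : 1 ≤ mt := by
          rcases not_or.mp hg with ⟨h1, -⟩; omega
        have hts_def : ((PySem.List.enumerate dw).filter (fun p => pvRole p.2 == some "user")).map (·.1) = pvTS dw := rfl
        rw [hts_def, main_bridge dw mt hmt]
        by_cases hts : pvTS dw = []
        · rw [if_pos hts, hts, if_neg (by simp; omega),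
            PySem.List.slice_from _ (by omega)]
          simp
        · rw [if_neg hts]
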